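-- pv_equiv track=rewrite | github.com/afreensumai64/Python_IITM_codes | sooms5.py | count_char_types
-- ===== SOURCE A (Python) =====
-- def count_char_types(text: str) -> dict:
--     """
--     Count the number of letters, digits, and spaces in a string.
--
--     Args:
--         text (str): The input string.
--
--     Returns:
--         dict: Dictionary with counts of 'letters', 'digits', and 'spaces'.
--
--     Example:
--         >>> count_char_types("Hi 123 there")
--         {'letters': 6, 'digits': 3, 'spaces': 2}
--     """
--     result = {'letters': 0, 'digits':0,'spaces':0}
--     for char in text:
--         if char.isalpha():
--             result['letters']+=1
--         elif char.isdigit():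
--             result['digits']+=1
--         elif char.isspace():
--             result['spaces']+=1
--     return result
-- ===== SOURCE B (Python) =====
-- def count_char_types(text: str) -> dict:
--     return {
--         'letters': sum(1 for c in text if c.isalpha()),
--         'digits': sum(1 for c in text if c.isdigit()),
--         'spaces': sum(1 for c in text if c.isspace()),
--     }
-- ===== Notes on version B (the rewrite author's own statement) =====
-- stated objective: simpler
-- what changed: Replaces the single elif-chained loop mutating a dict with three independent generator-sum scans (one per category), valid because isalpha/isdigit/isspace are mutually exclusive per character.
import Mathlib
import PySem

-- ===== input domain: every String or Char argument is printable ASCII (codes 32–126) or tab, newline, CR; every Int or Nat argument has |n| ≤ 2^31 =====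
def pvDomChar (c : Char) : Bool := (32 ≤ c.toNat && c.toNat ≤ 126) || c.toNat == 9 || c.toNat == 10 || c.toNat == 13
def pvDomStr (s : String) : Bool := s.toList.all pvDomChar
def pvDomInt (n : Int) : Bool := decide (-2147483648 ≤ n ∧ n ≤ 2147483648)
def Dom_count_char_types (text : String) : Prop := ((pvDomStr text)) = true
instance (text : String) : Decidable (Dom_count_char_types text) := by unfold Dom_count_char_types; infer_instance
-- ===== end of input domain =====

-- B replaces A's single elif-chained loop mutating a dict with three independent
-- per-category scans; same output because the three predicates are mutually exclusive.

-- ===== PORT A =====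
-- the elif-chained loop body, one step per character
def pvStepA (d : PySem.Dict String Int) (c : Char) : PySem.Dict String Int :=
  if PySem.Chars.isalpha c then d.modify "letters" 0 (· + 1)
  else if PySem.Chars.isdigit c then d.modify "digits" 0 (· + 1)
  else if PySem.Chars.isspace c then d.modify "spaces" 0 (· + 1)
  else d

def count_char_types (text : String) : List (String × Int) :=
  (text.toList.foldl pvStepA
    (PySem.Dict.ofList [("letters", 0), ("digits", 0), ("spaces", 0)])).items

-- ===== PORT B =====
def count_char_types_alt (text : String) : List (String × Int) :=
  [("letters", (text.toList.countP PySem.Chars.isalpha : Int)),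
   ("digits",  (text.toList.countP PySem.Chars.isdigit : Int)),
   ("spaces",  (text.toList.countP PySem.Chars.isspace : Int))]

-- ===== PRECONDITION & SPEC =====
def Spec_count_char_types (text : String) (out : List (String × Int)) : Prop := out = count_char_types_alt text
instance (text : String) (out : List (String × Int)) : Decidable (Spec_count_char_types text out) := by unfold Spec_count_char_types; infer_instance

-- ===== CLAIM (what is proved, stated in full; the proofs are below) =====
def Claim_equal_count_char_types : Prop := ∀ (text : String), Dom_count_char_types text → Spec_count_char_types text (count_char_types text)

-- ===== LEMMAS AND PROOFS =====
theorem pv_alpha_not_digit (c : Char) (h : PySem.Chars.isalpha c = true) : PySem.Chars.isdigit c = false := by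
  simp [PySem.Chars.isalpha, PySem.Chars.isupper, PySem.Chars.islower, PySem.Chars.isdigit,
    Char.le_def, UInt32.le_iff_toNat_le] at *
  omega

theorem pv_alpha_not_space (c : Char) (h : PySem.Chars.isalpha c = true) : PySem.Chars.isspace c = false := by
  simp [PySem.Chars.isalpha, PySem.Chars.isupper, PySem.Chars.islower, PySem.Chars.isspace,
    Char.le_def, UInt32.le_iff_toNat_le] at *
  omega

theorem pv_digit_not_space (c : Char) (h : PySem.Chars.isdigit c = true) : PySem.Chars.isspace c = false := by
  simp [PySem.Chars.isdigit, PySem.Chars.isspace, Char.le_def, UInt32.le_iff_toNat_le] at *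
  omega

theorem pv_mod_letters (a b s : Int) :
    (PySem.Dict.mk [("letters", a), ("digits", b), ("spaces", s)]).modify "letters" 0 (· + 1)
      = PySem.Dict.mk [("letters", a + 1), ("digits", b), ("spaces", s)] := rfl

theorem pv_mod_digits (a b s : Int) :
    (PySem.Dict.mk [("letters", a), ("digits", b), ("spaces", s)]).modify "digits" 0 (· + 1)
      = PySem.Dict.mk [("letters", a), ("digits", b + 1), ("spaces", s)] := rfl

theorem pv_mod_spaces (a b s : Int) :
    (PySem.Dict.mk [("letters", a), ("digits", b), ("spaces", s)]).modify "spaces" 0 (· + 1)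
      = PySem.Dict.mk [("letters", a), ("digits", b), ("spaces", s + 1)] := rfl

theorem pv_loop (l : List Char) : ∀ (a b s : Int),
    l.foldl pvStepA (PySem.Dict.mk [("letters", a), ("digits", b), ("spaces", s)])
      = PySem.Dict.mk [("letters", a + l.countP PySem.Chars.isalpha),
                       ("digits",  b + l.countP PySem.Chars.isdigit),
                       ("spaces",  s + l.countP PySem.Chars.isspace)] := by
  induction l with
  | nil => intro a b s; simp
  | cons c l ih =>
    intro a b s
    simp only [List.foldl_cons, List.countP_cons, pvStepA]
    by_cases ha : PySem.Chars.isalpha c = true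
    · rw [ha, if_pos rfl, pv_mod_letters, ih,
        pv_alpha_not_digit c ha, pv_alpha_not_space c ha]
      simp
      ring
    · rw [if_neg (by simp [ha])]
      by_cases hd : PySem.Chars.isdigit c = true
      · rw [hd, if_pos rfl, pv_mod_digits, ih, pv_digit_not_space c hd]
        simp [Bool.eq_false_iff.mpr ha]
        ring
      · rw [if_neg (by simp [hd])]
        by_cases hs : PySem.Chars.isspace c = true
        · rw [hs, if_pos rfl, pv_mod_spaces, ih]
          simp [Bool.eq_false_iff.mpr ha, Bool.eq_false_iff.mpr hd]
          ring
        · rw [if_neg (by simp [hs]), ih]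
          simp [Bool.eq_false_iff.mpr ha, Bool.eq_false_iff.mpr hd, Bool.eq_false_iff.mpr hs]

-- ===== VERDICT (by name: the statement is the Claim_ definition above) =====
theorem count_char_types_spec : Claim_equal_count_char_types := by
  intro text _
  show count_char_types text = count_char_types_alt text
  unfold count_char_types count_char_types_alt
  have h0 : PySem.Dict.ofList ([("letters", (0:Int)), ("digits", 0), ("spaces", 0)])
      = PySem.Dict.mk [("letters", 0), ("digits", 0), ("spaces", 0)] := rfl
  rw [h0, pv_loop]
  simp
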